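-- pv_equiv track=rewrite | github.com/constatza/dlkit | src/dlkit/interfaces/inference/transforms.py | _group_by_entry_name
-- ===== SOURCE A (Python) =====
-- from typing import Any
--
-- def _group_by_entry_name(prefix: str, state_dict: dict[str, Any]) -> dict[str, dict[str, Any]]:
--     """Group state dict keys by entry name.
--
--     Args:
--         prefix: Prefix to filter (e.g., "fitted_transforms")
--         state_dict: Full state dictionary
--
--     Returns:
--         Dictionary mapping entry names to their transform state dicts
--     """
--     grouped = {}
--
--     for key in state_dict.keys():
--         if not key.startswith(f"{prefix}."):
--             continue
--
--         # Parse: "prefix.entry_name.param.path" -> "entry_name"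
--         parts = key.split(".", 2)
--         if len(parts) < 2:
--             continue
--
--         entry_name = parts[1]
--         param_path = parts[2] if len(parts) > 2 else ""
--
--         if entry_name not in grouped:
--             grouped[entry_name] = {}
--
--         if param_path:
--             grouped[entry_name][param_path] = state_dict[key]
--
--     return grouped
-- ===== SOURCE B (Python) =====
-- def _parse(dot, key):
--     """Parse one matching key into (entry_name, param_path), or None."""
--     if not key.startswith(dot):
--         return None
--     parts = key.split(".", 2)
--     if len(parts) < 2:
--         return None
--     return parts[1], parts[2] if len(parts) > 2 else ""
--
--
-- def _group_by_entry_name(prefix, state_dict):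
--     """Group state dict keys by entry name (two-pass: parse, then group)."""
--     dot = f"{prefix}."
--     parsed = []
--     for key, value in state_dict.items():
--         p = _parse(dot, key)
--         if p is not None:
--             parsed.append((p[0], p[1], value))
--     order = list(dict.fromkeys(e for e, _p, _v in parsed))
--     return {e: {p: v for e2, p, v in parsed if e2 == e and p} for e in order}
-- ===== Notes on version B (the rewrite author's own statement) =====
-- stated objective: alternative
-- what changed: Replaced A's single pass that incrementally builds a dict of dicts with a two-pass collect-then-group decomposition: parse the matching keys into a flat (entry, param, value) list, dedup the entry names, and build each inner dict by filtering that list.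
import Mathlib
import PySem

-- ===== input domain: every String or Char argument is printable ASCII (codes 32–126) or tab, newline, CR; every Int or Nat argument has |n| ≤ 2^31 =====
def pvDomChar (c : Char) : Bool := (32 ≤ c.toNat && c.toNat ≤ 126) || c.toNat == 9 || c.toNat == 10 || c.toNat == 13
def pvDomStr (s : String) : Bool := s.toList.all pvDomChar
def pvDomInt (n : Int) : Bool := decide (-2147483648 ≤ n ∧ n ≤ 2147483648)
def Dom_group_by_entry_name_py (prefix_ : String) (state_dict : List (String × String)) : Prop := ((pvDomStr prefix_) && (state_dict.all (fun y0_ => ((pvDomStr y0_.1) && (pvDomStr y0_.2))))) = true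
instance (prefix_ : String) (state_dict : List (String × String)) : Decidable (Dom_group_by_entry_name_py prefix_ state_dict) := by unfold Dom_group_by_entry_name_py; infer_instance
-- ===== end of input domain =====

-- B replaces A's single-pass incremental dict-of-dicts with a two-pass collect-then-group
-- decomposition (parse matching keys into a flat list, dedup the entry names, build each
-- group by filtering); objective: alternative decomposition, same cost.
-- Equivalence is about the RETURN value; neither version mutates its arguments.

-- ===== PORT A =====
-- Port of A: one pass over the dict items, incrementally building a dict of dicts.
-- parts[1] / parts[2] are ported as pyGet? with .getD "" — both accesses are guarded by the
-- length tests, so the default is never used; the splitMax? 'none' branch is unreachable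
-- (the separator "." is nonempty).
def group_by_entry_name_py (prefix_ : String) (state_dict : List (String × String)) : List (String × List (String × String)) :=
  let grouped : PySem.Dict String (PySem.Dict String String) :=
    state_dict.foldl (fun grouped kv =>
      if PySem.Str.startswith kv.1 (prefix_ ++ ".") = false then grouped
      else
        match PySem.Str.splitMax? kv.1 "." 2 with
        | none => grouped
        | some parts =>
          if parts.length < 2 then grouped
          else
            let entry_name := (PySem.List.pyGet? parts 1).getD ""
            let param_path := if parts.length > 2 then (PySem.List.pyGet? parts 2).getD "" else ""
            let grouped1 := if grouped.contains entry_name = false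
                            then grouped.insert entry_name PySem.Dict.empty else grouped
            if param_path ≠ "" then
              grouped1.modify entry_name PySem.Dict.empty (fun d => d.insert param_path kv.2)
            else grouped1) PySem.Dict.empty
  grouped.items.map (fun p => (p.1, p.2.items))

-- ===== PORT B =====
-- Port of B's helper _parse: entry name and (possibly empty) param path of a matching key.
def pvParse (dot key : String) : Option (String × String) :=
  if PySem.Str.startswith key dot = false then none
  else
    match PySem.Str.splitMax? key "." 2 with
    | none => none
    | some parts =>
      if parts.length < 2 then none
      else some ((PySem.List.pyGet? parts 1).getD "",
                 if parts.length > 2 then (PySem.List.pyGet? parts 2).getD "" else "")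

-- Port of B: collect the parsed triples, dedup the entry names (dict.fromkeys), then build
-- each inner dict from the filtered triples (the dict comprehension as a fold of inserts).
def group_by_entry_name_py_alt (prefix_ : String) (state_dict : List (String × String)) : List (String × List (String × String)) :=
  let dot := prefix_ ++ "."
  let parsed : List (String × String × String) :=
    state_dict.foldl (fun acc kv =>
      match pvParse dot kv.1 with
      | some pr => acc ++ [(pr.1, pr.2, kv.2)]
      | none => acc) []
  let order := PySem.List.dedup (parsed.map (·.1))
  order.map (fun e =>
    (e, ((parsed.filter (fun t => t.1 == e && !(t.2.1 == ""))).foldl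
          (fun (d : PySem.Dict String String) t => d.insert t.2.1 t.2.2) PySem.Dict.empty).items))

-- ===== PRECONDITION & SPEC =====
def Spec_group_by_entry_name_py (prefix_ : String) (state_dict : List (String × String)) (out : List (String × List (String × String))) : Prop := out = group_by_entry_name_py_alt prefix_ state_dict
instance (prefix_ : String) (state_dict : List (String × String)) (out : List (String × List (String × String))) : Decidable (Spec_group_by_entry_name_py prefix_ state_dict out) := by unfold Spec_group_by_entry_name_py; infer_instance

-- ===== CLAIM (what is proved, stated in full; the proofs are below) =====
def Claim_equal_group_by_entry_name_py : Prop := ∀ (prefix_ : String) (state_dict : List (String × String)), Dom_group_by_entry_name_py prefix_ state_dict → Spec_group_by_entry_name_py prefix_ state_dict (group_by_entry_name_py prefix_ state_dict)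

-- ===== LEMMAS AND PROOFS =====

-- A's loop body as a named function (syntactically identical to the lambda in the port).
def aStep (prefix_ : String) (grouped : PySem.Dict String (PySem.Dict String String))
    (kv : String × String) : PySem.Dict String (PySem.Dict String String) :=
  if PySem.Str.startswith kv.1 (prefix_ ++ ".") = false then grouped
  else
    match PySem.Str.splitMax? kv.1 "." 2 with
    | none => grouped
    | some parts =>
      if parts.length < 2 then grouped
      else
        let entry_name := (PySem.List.pyGet? parts 1).getD ""
        let param_path := if parts.length > 2 then (PySem.List.pyGet? parts 2).getD "" else ""
        let grouped1 := if grouped.contains entry_name = false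
                        then grouped.insert entry_name PySem.Dict.empty else grouped
        if param_path ≠ "" then
          grouped1.modify entry_name PySem.Dict.empty (fun d => d.insert param_path kv.2)
        else grouped1

-- A's step, expressed on a parsed triple.
def stepA (g : PySem.Dict String (PySem.Dict String String)) (t : String × String × String) :
    PySem.Dict String (PySem.Dict String String) :=
  let g1 := if g.contains t.1 = false then g.insert t.1 PySem.Dict.empty else g
  if t.2.1 ≠ "" then g1.modify t.1 PySem.Dict.empty (fun d => d.insert t.2.1 t.2.2) else g1

-- B's inner dict for entry e.
def innerD (e : String) (ps : List (String × String × String)) : PySem.Dict String String :=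
  (ps.filter (fun t => t.1 == e && !(t.2.1 == ""))).foldl
    (fun d t => d.insert t.2.1 t.2.2) PySem.Dict.empty

lemma aStep_eq_parse (prefix_ : String) (g : PySem.Dict String (PySem.Dict String String))
    (kv : String × String) :
    aStep prefix_ g kv =
      match pvParse (prefix_ ++ ".") kv.1 with
      | some pr => stepA g (pr.1, pr.2, kv.2)
      | none => g := by
  unfold aStep pvParse stepA
  by_cases h1 : PySem.Str.startswith kv.1 (prefix_ ++ ".") = false
  · rw [if_pos h1, if_pos h1]
  · rw [if_neg h1, if_neg h1]
    cases h2 : PySem.Str.splitMax? kv.1 "." 2 with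
    | none => rfl
    | some parts =>
      dsimp only
      by_cases h3 : parts.length < 2
      · rw [if_pos h3, if_pos h3]
      · rw [if_neg h3, if_neg h3]

lemma parsed_foldl_eq (dot : String) (sd : List (String × String))
    (acc : List (String × String × String)) :
    sd.foldl (fun acc kv =>
      match pvParse dot kv.1 with
      | some pr => acc ++ [(pr.1, pr.2, kv.2)]
      | none => acc) acc =
    acc ++ sd.filterMap (fun kv => (pvParse dot kv.1).map (fun pr => (pr.1, pr.2, kv.2))) := by
  induction sd generalizing acc with
  | nil => simp
  | cons kv rest ih =>
    cases h : pvParse dot kv.1 with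
    | none => simp [List.foldl_cons, h, List.filterMap_cons, ih]
    | some pr => simp [List.foldl_cons, h, List.filterMap_cons, ih]

lemma aFold_eq (prefix_ : String) (sd : List (String × String))
    (g : PySem.Dict String (PySem.Dict String String)) :
    sd.foldl (aStep prefix_) g =
    (sd.filterMap (fun kv => (pvParse (prefix_ ++ ".") kv.1).map (fun pr => (pr.1, pr.2, kv.2)))).foldl stepA g := by
  induction sd generalizing g with
  | nil => simp
  | cons kv rest ih =>
    rw [List.foldl_cons, aStep_eq_parse, List.filterMap_cons]
    cases h : pvParse (prefix_ ++ ".") kv.1 with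
    | none => simp [h, ih]
    | some pr => simp [h, ih]

lemma dedup_snoc (xs : List String) (x : String) :
    PySem.List.dedup (xs ++ [x]) =
      if x ∈ xs then PySem.List.dedup xs else PySem.List.dedup xs ++ [x] := by
  simp only [PySem.List.dedup_eq_ofList, PySem.Set.ofList_append, PySem.Set.update_cons,
    PySem.Set.update_nil, PySem.Set.add]
  by_cases h : x ∈ xs
  · rw [if_pos, if_pos h]
    exact (List.contains_iff).mpr ((PySem.Set.mem_ofList _ _).mpr h)
  · rw [if_neg, if_neg h]
    intro hc
    exact h ((PySem.Set.mem_ofList _ _).mp ((List.contains_iff).mp hc))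

lemma innerD_snoc (e : String) (ps : List (String × String × String)) (t : String × String × String) :
    innerD e (ps ++ [t]) =
      if t.1 == e && !(t.2.1 == "") then (innerD e ps).insert t.2.1 t.2.2 else innerD e ps := by
  unfold innerD
  rw [List.filter_append, List.foldl_append]
  cases h : (t.1 == e && !(t.2.1 == "")) with
  | false => simp [h]
  | true => simp [h]

lemma innerD_empty_of_not_mem (e : String) (ps : List (String × String × String))
    (h : e ∉ ps.map (·.1)) : innerD e ps = PySem.Dict.empty := by
  unfold innerD
  have hnil : ps.filter (fun t => t.1 == e && !(t.2.1 == "")) = [] := by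
    rw [List.filter_eq_nil_iff]
    intro t ht
    simp only [Bool.and_eq_true, beq_iff_eq, Bool.not_eq_true', not_and]
    intro h1
    exact fun _ => h (h1 ▸ List.mem_map_of_mem ht)
  rw [hnil]
  rfl

lemma main_items (ps : List (String × String × String)) :
    (ps.foldl stepA PySem.Dict.empty).items =
      (PySem.List.dedup (ps.map (·.1))).map (fun e => (e, innerD e ps)) := by
  induction ps using List.reverseRecOn with
  | nil => rfl
  | append_singleton l t ih =>
    obtain ⟨e, p, v⟩ := t
    rw [List.foldl_append, List.foldl_cons, List.foldl_nil, List.map_append, List.map_cons,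
      List.map_nil, dedup_snoc]
    have hk : (l.foldl stepA PySem.Dict.empty).keys = PySem.List.dedup (l.map (·.1)) := by
      simp [PySem.Dict.keys, ih, Function.comp_def]
    have hnd : (PySem.List.dedup (l.map (·.1))).Nodup := PySem.List.nodup_dedup _
    set g := l.foldl stepA PySem.Dict.empty with hgdef
    have hcont : g.contains e = true ↔ e ∈ l.map (·.1) := by
      rw [PySem.Dict.contains_iff_mem_keys, hk, PySem.List.mem_dedup]
    by_cases hmem : e ∈ l.map (·.1)
    · have hc : g.contains e = true := hcont.mpr hmem
      rw [if_pos hmem]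
      by_cases hp : p = ""
      · have hst : stepA g (e, p, v) = g := by simp [stepA, hc, hp]
        rw [hst, ih]
        refine List.map_congr_left (fun e' _ => ?_)
        rw [innerD_snoc]
        simp [hp]
      · have hget : g.getD e PySem.Dict.empty = innerD e l := by
          refine PySem.Dict.getD_of_mem_items _ ?_ ?_ _
          · rw [ih]
            exact List.mem_map_of_mem ((PySem.List.mem_dedup _ _).mpr hmem)
          · rw [hk]; exact hnd
        have hst : stepA g (e, p, v) = g.insert e ((innerD e l).insert p v) := by
          simp [stepA, hc, hp, PySem.Dict.modify, hget]
        rw [hst, PySem.Dict.items_insert_of_contains _ _ hc, ih, List.map_map]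
        refine List.map_congr_left (fun e' he' => ?_)
        by_cases he : e' = e
        · subst he
          rw [innerD_snoc]
          simp [hp]
        · rw [innerD_snoc]
          simp [he, Ne.symm he]
    · have hc : g.contains e = false := by
        rw [Bool.eq_false_iff]
        exact fun h => hmem (hcont.mp h)
      have hne : ∀ e' ∈ PySem.List.dedup (l.map (·.1)), e' ≠ e := by
        intro e' he' h
        exact hmem (h ▸ (PySem.List.mem_dedup _ _).mp he')
      have hinner0 : innerD e l = PySem.Dict.empty := innerD_empty_of_not_mem e l hmem
      rw [if_neg hmem]
      by_cases hp : p = ""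
      · have hst : stepA g (e, p, v) = g.insert e PySem.Dict.empty := by
          simp [stepA, hc, hp]
        rw [hst, PySem.Dict.items_insert_of_not_contains _ _ hc, ih, List.map_append, List.map_cons,
          List.map_nil]
        congr 1
        · refine List.map_congr_left (fun e' he' => ?_)
          rw [innerD_snoc]
          simp [hp]
        · rw [innerD_snoc]
          simp [hp, hinner0]
      · have hst : stepA g (e, p, v) = g.insert e (PySem.Dict.empty.insert p v) := by
          simp only [stepA, hc, if_pos rfl, hp, ne_eq, not_false_eq_true, if_true,
            PySem.Dict.modify]
          rw [PySem.Dict.getD_insert_self, PySem.Dict.insert_insert_self]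
        rw [hst, PySem.Dict.items_insert_of_not_contains _ _ hc, ih, List.map_append, List.map_cons,
          List.map_nil]
        congr 1
        · refine List.map_congr_left (fun e' he' => ?_)
          rw [innerD_snoc]
          simp [(hne e' he').symm]
        · rw [innerD_snoc]
          simp [hp, hinner0]

-- ===== VERDICT (by name: the statement is the Claim_ definition above) =====
theorem group_by_entry_name_py_spec : Claim_equal_group_by_entry_name_py := by
  intro prefix_ state_dict _hdom
  show group_by_entry_name_py prefix_ state_dict = group_by_entry_name_py_alt prefix_ state_dict
  simp only [group_by_entry_name_py, group_by_entry_name_py_alt]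
  rw [show (fun (grouped : PySem.Dict String (PySem.Dict String String)) (kv : String × String) =>
      if PySem.Str.startswith kv.1 (prefix_ ++ ".") = false then grouped
      else
        match PySem.Str.splitMax? kv.1 "." 2 with
        | none => grouped
        | some parts =>
          if parts.length < 2 then grouped
          else
            let entry_name := (PySem.List.pyGet? parts 1).getD ""
            let param_path := if parts.length > 2 then (PySem.List.pyGet? parts 2).getD "" else ""
            let grouped1 := if grouped.contains entry_name = false
                            then grouped.insert entry_name PySem.Dict.empty else grouped
            if param_path ≠ "" then
              grouped1.modify entry_name PySem.Dict.empty (fun d => d.insert param_path kv.2)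
            else grouped1) = aStep prefix_ from rfl]
  rw [aFold_eq, parsed_foldl_eq, List.nil_append, main_items]
  simp only [List.map_map]
  rfl
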